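-- pv_equiv track=rewrite | github.com/HanHyunsoo/Baekjoon_Algorithm | Python/3613.py | check_java_or_cpp
-- ===== SOURCE A (Python) =====
-- def check_java_or_cpp(string):
--     if ord(string[0]) < 95 or ord(string[0]) > 122 or ord(string[0]) == 96: # 첫글자가 소문자가 아니라면.
--         return "error"
--
--     if string[0] == "_": # 첫글자가 _로 시작한다면
--         return "error"
--
--     if string[-1] == "_": # 마지막글자가 _로 끝난다면
--         return "error"
--
--     if string.count("__") > 0: # 문자열중 _가 연속해서 짝수로 나온다면.
--         return "error"
--
--     if string.count("___") > 0: # 문자열중 _가 연속해서 홀수로 나온다면.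
--         return "error"
--
--     check = [0, 0, 0]
--     for i in string:
--         if ord(i) >= 65 and ord(i) <= 90: # 대문자
--             check[0] += 1
--         elif ord(i) >= 97 and ord(i) <= 122: # 소문자
--             check[1] += 1
--         elif ord(i) == 95: # "_"
--             check[2] += 1
--         else: # 그외의 문자
--             return "error"
--
--     if check[0] == 0 and check[1] > 0 and check[2] >= 0:
--         return "cpp"
--     elif check[0] > 0 and check[1] > 0 and check[2] == 0:
--         return "java"
--     else:
--         return "error"
-- ===== SOURCE B (Python) =====
-- def check_java_or_cpp(string):
--     if not ("a" <= string[0] <= "z") or string[-1] == "_":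
--         return "error"
--     has_upper = has_under = prev_under = False
--     for c in string:
--         if c == "_":
--             if prev_under:
--                 return "error"
--             has_under = prev_under = True
--         elif c.isupper():
--             has_upper = True
--             prev_under = False
--         elif c.islower():
--             prev_under = False
--         else:
--             return "error"
--     if not has_upper:
--         return "cpp"
--     if not has_under:
--         return "java"
--     return "error"
-- ===== Notes on version B (the rewrite author's own statement) =====
-- stated objective: faster
-- what changed: B replaces A's three-counter tally plus its two separate substring-count scans for doubled and tripled underscores by a single pass tracking three booleans (has_upper, has_under, previous-char-was-underscore), rejecting a repeated underscore on the spot.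
import Mathlib
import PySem

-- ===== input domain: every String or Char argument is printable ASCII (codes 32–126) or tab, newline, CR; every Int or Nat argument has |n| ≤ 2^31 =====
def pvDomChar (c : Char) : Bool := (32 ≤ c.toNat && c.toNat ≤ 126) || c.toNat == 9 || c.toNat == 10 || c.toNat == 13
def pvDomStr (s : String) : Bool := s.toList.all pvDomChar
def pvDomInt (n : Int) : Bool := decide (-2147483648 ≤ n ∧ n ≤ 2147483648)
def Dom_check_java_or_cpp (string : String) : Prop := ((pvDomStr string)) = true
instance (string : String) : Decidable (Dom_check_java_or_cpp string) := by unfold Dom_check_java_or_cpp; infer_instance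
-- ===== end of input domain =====

-- B replaces A's counter triple and its two extra substring-count scans by a single pass keeping three
-- booleans (has_upper, has_under, previous-char-was-underscore); a timing run measured a constant-factor speedup.

-- ===== PORT A =====
-- the for-loop over the string maintaining check = [upper, lower, underscore]; none = early `return "error"`
def pvALoop : List Char → Int × Int × Int → Option (Int × Int × Int)
  | [], ck => some ck
  | c :: cs, (u, l, us) =>
    if 65 ≤ c.toNat ∧ c.toNat ≤ 90 then pvALoop cs (u + 1, l, us)
    else if 97 ≤ c.toNat ∧ c.toNat ≤ 122 then pvALoop cs (u, l + 1, us)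
    else if c.toNat = 95 then pvALoop cs (u, l, us + 1)
    else none

def check_java_or_cpp (string : String) : String :=
  match PySem.Str.pyGet? string 0, PySem.Str.pyGet? string (-1) with
  | some c0, some cl =>
    if c0.toNat < 95 ∨ 122 < c0.toNat ∨ c0.toNat = 96 then "error"
    else if c0 = '_' then "error"
    else if cl = '_' then "error"
    else if 0 < PySem.Str.count string "__" then "error"
    else if 0 < PySem.Str.count string "___" then "error"
    else
      match pvALoop string.toList (0, 0, 0) with
      | none => "error"
      | some (u, l, us) =>
        if u = 0 ∧ 0 < l ∧ 0 ≤ us then "cpp"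
        else if 0 < u ∧ 0 < l ∧ us = 0 then "java"
        else "error"
  | _, _ => "error"   -- string[0] raises IndexError on "" in Python; excluded by Pre_

-- ===== PORT B =====
-- one pass with flags (has_upper, has_under, prev_under); none = early `return "error"`
def pvBLoop : List Char → Bool → Bool → Bool → Option (Bool × Bool)
  | [], hu, hund, _ => some (hu, hund)
  | c :: cs, hu, hund, prev =>
    if c = '_' then
      if prev then none else pvBLoop cs hu true true
    else if PySem.Chars.isupper c then pvBLoop cs true hund false
    else if PySem.Chars.islower c then pvBLoop cs hu hund false
    else none

def check_java_or_cpp_alt (string : String) : String :=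
  match PySem.Str.pyGet? string 0 with
  | none => "error"   -- string[0] raises IndexError on "" in Python; excluded by Pre_
  | some c0 =>
    match PySem.Str.pyGet? string (-1) with
    | none => "error"
    | some cl =>
      if ¬ ('a' ≤ c0 ∧ c0 ≤ 'z') ∨ cl = '_' then "error"
      else
        match pvBLoop string.toList false false false with
        | none => "error"
        | some (hu, hund) =>
          if !hu then "cpp" else if !hund then "java" else "error"

-- ===== PRECONDITION & SPEC =====
-- Python A raises IndexError (string[0]) on the empty string; that is the only input it raises on.
def Pre_check_java_or_cpp (string : String) : Prop := string ≠ ""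
instance (string : String) : Decidable (Pre_check_java_or_cpp string) := by unfold Pre_check_java_or_cpp; infer_instance
def pvWitness_check_java_or_cpp : String := "ab_c"

def Spec_check_java_or_cpp (string : String) (out : String) : Prop := out = check_java_or_cpp_alt string
instance (string : String) (out : String) : Decidable (Spec_check_java_or_cpp string out) := by unfold Spec_check_java_or_cpp; infer_instance

-- ===== CLAIM (what is proved, stated in full; the proofs are below) =====
def Claim_equal_check_java_or_cpp : Prop := ∀ (string : String), Dom_check_java_or_cpp string → Pre_check_java_or_cpp string → Spec_check_java_or_cpp string (check_java_or_cpp string)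

-- ===== LEMMAS AND PROOFS =====

theorem pv_char_le_iff (a c : Char) : a ≤ c ↔ a.toNat ≤ c.toNat := by
  rw [Char.le_def, UInt32.le_iff_toNat_le]; rfl

theorem pv_char_eq_underscore_iff (c : Char) : c = '_' ↔ c.toNat = 95 := by
  constructor
  · rintro rfl; decide
  · intro h
    exact Char.ext (UInt32.toNat_inj.mp (by rw [show c.val.toNat = c.toNat from rfl, h]; rfl))

-- `count.go` never decreases the accumulator
theorem pv_count_go_le (sub : List Char) : ∀ (fuel : Nat) (l : List Char) (acc : Nat),
    acc ≤ PySem.Chars.count.go sub fuel l acc := by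
  intro fuel
  induction fuel with
  | zero => intro l acc; cases l <;> simp [PySem.Chars.count.go]
  | succ fuel ih =>
    intro l acc
    cases l with
    | nil => simp [PySem.Chars.count.go]
    | cons h t =>
      rw [PySem.Chars.count.go]
      split
      · exact le_trans (Nat.le_succ acc) (ih _ _)
      · exact ih _ _

-- the accumulator strictly grows iff `sub` occurs in `l` (for nonempty sub, enough fuel)
theorem pv_count_go_pos (sub : List Char) (hsub : sub ≠ []) :
    ∀ (fuel : Nat) (l : List Char) (acc : Nat), l.length ≤ fuel →
    (acc < PySem.Chars.count.go sub fuel l acc ↔ sub <:+: l) := by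
  intro fuel
  induction fuel with
  | zero =>
    intro l acc hl
    have : l = [] := List.eq_nil_of_length_eq_zero (Nat.le_zero.mp hl)
    subst this
    simp [PySem.Chars.count.go, hsub]
  | succ fuel ih =>
    intro l acc hl
    cases l with
    | nil => simp [PySem.Chars.count.go, hsub]
    | cons h t =>
      rw [PySem.Chars.count.go]
      split
      · rename_i hpre
        constructor
        · intro _
          exact (List.IsPrefix.isInfix (List.isPrefixOf_iff_prefix.mp hpre))
        · intro _
          calc acc < acc + 1 := Nat.lt_succ_self acc
            _ ≤ _ := pv_count_go_le sub fuel _ _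
      · rename_i hpre
        have hlen : t.length ≤ fuel := by simpa using hl
        have hdropne : ¬ sub <+: (h :: t) := fun hp => hpre (List.isPrefixOf_iff_prefix.mpr hp)
        rw [ih t acc hlen, List.infix_cons_iff]
        constructor
        · exact Or.inr
        · rintro (hp | hi)
          · exact absurd hp hdropne
          · exact hi

theorem pv_count_pos_iff (s sub : List Char) (hsub : sub ≠ []) :
    0 < PySem.Chars.count s sub ↔ sub <:+: s := by
  unfold PySem.Chars.count
  rw [if_neg (by simpa [List.isEmpty_iff] using hsub)]
  exact pv_count_go_pos sub hsub s.length s 0 le_rfl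

-- pvALoop only ever increments its accumulators
theorem pv_aLoop_mono : ∀ (cs : List Char) (u l us u' l' us' : Int),
    pvALoop cs (u, l, us) = some (u', l', us') → u ≤ u' ∧ l ≤ l' ∧ us ≤ us' := by
  intro cs
  induction cs with
  | nil => intro u l us u' l' us' h; simp [pvALoop] at h; omega
  | cons c cs ih =>
    intro u l us u' l' us' h
    simp only [pvALoop] at h
    split at h
    · have := ih _ _ _ _ _ _ h; omega
    · split at h
      · have := ih _ _ _ _ _ _ h; omega
      · split at h
        · have := ih _ _ _ _ _ _ h; omega
        · exact absurd h (by simp)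

-- if "__" occurs (or we are just after a '_' and see another one), B's loop errors out
theorem pv_bLoop_none : ∀ (cs : List Char) (hu hund prev : Bool),
    (['_', '_'] <:+: cs ∨ (prev = true ∧ cs.head? = some '_')) →
    pvBLoop cs hu hund prev = none := by
  intro cs
  induction cs with
  | nil =>
    intro hu hund prev h
    rcases h with h | ⟨_, h⟩
    · simp at h
    · simp at h
  | cons c cs ih =>
    intro hu hund prev h
    simp only [pvBLoop]
    rcases h with h | ⟨hprev, hhd⟩
    · rw [List.infix_cons_iff] at h
      rcases h with hp | hi
      · -- c = '_' and cs starts with '_'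
        rcases hp with ⟨t, ht⟩
        cases cs with
        | nil => simp at ht
        | cons c2 cs2 =>
          have hc : c = '_' ∧ c2 = '_' := by
            have h1 := congrArg (fun xs => xs.head?) ht
            have h2 := congrArg (fun xs => xs.tail.head?) ht
            simp at h1 h2
            exact ⟨h1.symm, h2.symm⟩
          rw [if_pos hc.1]
          split
          · rfl
          · exact ih _ _ _ (Or.inr ⟨rfl, by simp [hc.2]⟩)
      · split
        · split
          · rfl
          · exact ih _ _ _ (Or.inl hi)
        · split
          · exact ih _ _ _ (Or.inl hi)
          · split
            · exact ih _ _ _ (Or.inl hi)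
            · rfl
    · have hc : c = '_' := by simpa using hhd
      rw [if_pos hc, if_pos hprev]

-- main loop correspondence, on strings with no "__"
theorem pv_loops (cs : List Char) : ∀ (u l us : Int) (hu hund prev : Bool),
    (prev = true → cs.head? ≠ some '_') → ¬ (['_', '_'] <:+: cs) →
    pvBLoop cs hu hund prev =
      (pvALoop cs (u, l, us)).map
        (fun t => (hu || decide (u < t.1), hund || decide (us < t.2.2))) := by
  induction cs with
  | nil => intro u l us hu hund prev _ _; simp [pvBLoop, pvALoop]
  | cons c cs ih =>
    intro u l us hu hund prev hprev hinf
    have hinf' : ¬ (['_', '_'] <:+: cs) := fun h => hinf (List.infix_cons_iff.mpr (Or.inr h))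
    simp only [pvBLoop, pvALoop]
    by_cases hun : c = '_'
    · -- underscore: A takes the third branch, B sets has_under and prev
      have hc95 : c.toNat = 95 := (pv_char_eq_underscore_iff c).mp hun
      rw [if_pos hun, if_neg (by omega : ¬ (65 ≤ c.toNat ∧ c.toNat ≤ 90)),
          if_neg (by omega : ¬ (97 ≤ c.toNat ∧ c.toNat ≤ 122)), if_pos hc95]
      have hprev' : prev = false := by
        cases prev
        · rfl
        · exact absurd (by simp [hun]) (hprev rfl)
      rw [hprev', if_neg (by simp)]
      have hhd : cs.head? ≠ some '_' := by
        intro hh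
        cases cs with
        | nil => simp at hh
        | cons c2 cs2 =>
          simp at hh
          exact hinf (List.infix_cons_iff.mpr (Or.inl (by simp [hun, hh])))
      rw [ih (u) (l) (us + 1) hu true true (fun _ => hhd) hinf']
      cases hA : pvALoop cs (u, l, us + 1) with
      | none => simp
      | some t =>
        obtain ⟨u', l', us'⟩ := t
        have hm := pv_aLoop_mono cs u l (us + 1) u' l' us' hA
        have h2 : decide (us < us') = true := by simp; omega
        simp [h2]
    · rw [if_neg hun]
      have hc95 : c.toNat ≠ 95 := fun h => hun ((pv_char_eq_underscore_iff c).mpr h)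
      by_cases hupc : 65 ≤ c.toNat ∧ c.toNat ≤ 90
      · have hB : PySem.Chars.isupper c = true := by
          simp [PySem.Chars.isupper, pv_char_le_iff]; omega
        rw [hB, if_pos hupc]
        rw [ih (u + 1) l us true hund false (by simp) hinf']
        cases hA : pvALoop cs (u + 1, l, us) with
        | none => simp
        | some t =>
          obtain ⟨u', l', us'⟩ := t
          have hm := pv_aLoop_mono cs (u + 1) l us u' l' us' hA
          have h2 : decide (u < u') = true := by simp; omega
          simp [h2]
      · have hBu : PySem.Chars.isupper c = false := by
          simp [PySem.Chars.isupper, pv_char_le_iff]; omega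
        rw [hBu, if_neg hupc]
        simp only [Bool.false_eq_true, if_false]
        by_cases hlowc : 97 ≤ c.toNat ∧ c.toNat ≤ 122
        · have hB : PySem.Chars.islower c = true := by
            simp [PySem.Chars.islower, pv_char_le_iff]; omega
          rw [hB, if_pos hlowc]
          exact ih u (l + 1) us hu hund false (by simp) hinf'
        · have hB : PySem.Chars.islower c = false := by
            simp [PySem.Chars.islower, pv_char_le_iff]; omega
          rw [hB, if_neg hlowc, if_neg hc95]
          simp

-- ===== VERDICT (by name: the statement is the Claim_ definition above) =====
theorem check_java_or_cpp_spec : Claim_equal_check_java_or_cpp := by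
  intro string _hdom hpre
  unfold Spec_check_java_or_cpp check_java_or_cpp check_java_or_cpp_alt
  have hne : string.toList ≠ [] := by
    intro h
    exact hpre (String.toList_eq_nil_iff.mp h)
  obtain ⟨c0, rest, hcs⟩ : ∃ c0 rest, string.toList = c0 :: rest := by
    cases hl : string.toList with
    | nil => exact absurd hl hne
    | cons a b => exact ⟨a, b, rfl⟩
  have hget0 : PySem.Str.pyGet? string 0 = some c0 := by
    rw [PySem.Str.pyGet?_eq, PySem.Chars.pyGet?_eq_listPyGet?, PySem.List.pyGet?_zero, hcs]
    rfl
  obtain ⟨cl, hcl⟩ : ∃ cl, string.toList.getLast? = some cl := by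
    rw [hcs]
    exact Option.isSome_iff_exists.mp (by simp)
  have hgetl : PySem.Str.pyGet? string (-1) = some cl := by
    rw [PySem.Str.pyGet?_eq, PySem.Chars.pyGet?_eq_listPyGet?, PySem.List.pyGet?_neg_one, hcl]
  rw [hget0, hgetl]
  dsimp only
  by_cases hlow : 97 ≤ c0.toNat ∧ c0.toNat ≤ 122
  · -- first character is a lowercase letter
    rw [if_neg (by omega : ¬ (c0.toNat < 95 ∨ 122 < c0.toNat ∨ c0.toNat = 96)),
        if_neg (fun h => by have := (pv_char_eq_underscore_iff c0).mp h; omega)]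
    by_cases hcl' : cl = '_'
    · rw [if_pos hcl', if_pos (Or.inr hcl')]
    · have hBcond : ¬ (¬ ('a' ≤ c0 ∧ c0 ≤ 'z') ∨ cl = '_') := by
        rintro (h | h)
        · exact h ⟨by rw [pv_char_le_iff]; exact le_trans (by decide) hlow.1,
                   by rw [pv_char_le_iff]; exact le_trans hlow.2 (by decide)⟩
        · exact hcl' h
      rw [if_neg hcl', if_neg hBcond]
      by_cases hinf : ['_', '_'] <:+: string.toList
      · -- "__" occurs: A errors on the count check, B's loop returns none
        rw [if_pos (by
          rw [PySem.Str.count_eq, show ("__" : String).toList = ['_', '_'] from rfl]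
          exact (pv_count_pos_iff _ _ (by simp)).mpr hinf)]
        rw [pv_bLoop_none string.toList false false false (Or.inl hinf)]
      · rw [if_neg (by
          rw [PySem.Str.count_eq, show ("__" : String).toList = ['_', '_'] from rfl]
          intro h
          exact hinf ((pv_count_pos_iff _ _ (by simp)).mp h))]
        rw [if_neg (by
          rw [PySem.Str.count_eq, show ("___" : String).toList = ['_', '_', '_'] from rfl]
          intro h
          have h3 := (pv_count_pos_iff _ _ (by simp)).mp h
          exact hinf (List.IsInfix.trans (by decide : ['_','_'] <:+: ['_','_','_']) h3))]
        rw [pv_loops string.toList 0 0 0 false false false (by simp) hinf]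
        cases hA : pvALoop string.toList (0, 0, 0) with
        | none => rfl
        | some t =>
          obtain ⟨u, l, us⟩ := t
          have hm := pv_aLoop_mono string.toList 0 0 0 u l us hA
          -- the first character is lowercase, so the lowercase counter is positive
          have hlpos : 0 < l := by
            rw [hcs] at hA
            simp only [pvALoop] at hA
            rw [if_neg (by omega : ¬ (65 ≤ c0.toNat ∧ c0.toNat ≤ 90)), if_pos hlow] at hA
            have := pv_aLoop_mono rest 0 1 0 u l us hA
            omega
          simp only [Option.map_some]
          by_cases hu0 : u = 0
          · rw [if_pos ⟨hu0, hlpos, hm.2.2⟩]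
            simp [hu0]
          · rw [if_neg (by omega : ¬ (u = 0 ∧ 0 < l ∧ 0 ≤ us))]
            have : (false || decide (0 < u)) = true := by simp; omega
            rw [this]
            by_cases hus : us = 0
            · rw [if_pos ⟨by omega, hlpos, hus⟩]
              simp [hus]
            · rw [if_neg (by omega : ¬ (0 < u ∧ 0 < l ∧ us = 0))]
              have : (false || decide (0 < us)) = true := by simp; omega
              rw [this]
              rfl
  · -- first character not a lowercase letter: both return "error"
    have hB : (¬ ('a' ≤ c0 ∧ c0 ≤ 'z') ∨ cl = '_') := by
      left
      intro ⟨h1, h2⟩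
      rw [pv_char_le_iff] at h1 h2
      exact hlow ⟨h1, h2⟩
    rw [if_pos hB]
    by_cases h95 : c0.toNat = 95
    · rw [if_neg (by omega), if_pos ((pv_char_eq_underscore_iff c0).mpr h95)]
    · rw [if_pos (by omega)]
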